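-- pv_equiv track=rewrite | github.com/seunghy/algorithm_prac | codility/03.lesson11to15/lesson12.py | solution
-- ===== SOURCE A (Python) =====
-- def solution(N, M):
--     if M == 1:
--         return N
--     rest = 1
--     A = N
--     B = M
--     while B != 0:
--         rest = A%B
--         A = B
--         B = rest
--
--     return N//A
-- ===== SOURCE B (Python) =====
-- def solution(N, M):
--     def g(a, b):
--         return a if b == 0 else g(b, a % b)
--     return N // g(N, M)
-- ===== Notes on version B (the rewrite author's own statement) =====
-- stated objective: simpler
-- what changed: Replaced the iterative three-variable while loop plus the redundant M==1 guard by a two-line recursive Euclidean helper g(a,b) and a single return N // g(N, M).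
import Mathlib
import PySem

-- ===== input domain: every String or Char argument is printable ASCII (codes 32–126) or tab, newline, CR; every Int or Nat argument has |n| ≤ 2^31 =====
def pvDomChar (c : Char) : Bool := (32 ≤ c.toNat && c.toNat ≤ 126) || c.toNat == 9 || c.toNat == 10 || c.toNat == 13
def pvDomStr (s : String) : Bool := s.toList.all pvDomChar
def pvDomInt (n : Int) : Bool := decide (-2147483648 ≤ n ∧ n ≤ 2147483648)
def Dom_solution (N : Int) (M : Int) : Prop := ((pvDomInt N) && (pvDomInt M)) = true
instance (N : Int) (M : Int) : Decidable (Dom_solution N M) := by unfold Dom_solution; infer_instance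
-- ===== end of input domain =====

-- B: recursive Euclid helper instead of A's iterative while loop; drops A's redundant M==1 guard (simpler, same cost).
-- ===== PORT A =====
-- |a % b| < |b| when b ≠ 0 (Python mod takes the divisor's sign); used for termination of both ports
theorem pvModNatAbsLt (a b : Int) (hb : b ≠ 0) : (PySem.Int.mod a b).natAbs < b.natAbs := by
  rcases lt_or_gt_of_ne hb with h | h
  · have := PySem.Int.mod_neg_bounds a h; omega
  · have h1 := PySem.Int.mod_nonneg a h; have h2 := PySem.Int.mod_lt a h; omega

-- the while loop of A, with its state (rest, A, B): rest = A%B; A = B; B = rest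
def solutionLoop (rest A B : Int) : Int :=
  if h : B = 0 then A
  else solutionLoop (PySem.Int.mod A B) B (PySem.Int.mod A B)
termination_by B.natAbs
decreasing_by exact pvModNatAbsLt A B h

def solution (N : Int) (M : Int) : Int :=
  if M = 1 then N
  else PySem.Int.floordiv N (solutionLoop 1 N M)

-- ===== PORT B =====
-- def g(a, b): return a if b == 0 else g(b, a % b)
def solutionG (a b : Int) : Int :=
  if h : b = 0 then a else solutionG b (PySem.Int.mod a b)
termination_by b.natAbs
decreasing_by exact pvModNatAbsLt a b h

def solution_alt (N : Int) (M : Int) : Int :=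
  PySem.Int.floordiv N (solutionG N M)

-- ===== PRECONDITION & SPEC =====
-- Pre_ excludes the single input where gcd(N,M) is zero, on which A (and B) raise ZeroDivisionError.
def Pre_solution (N : Int) (M : Int) : Prop := ¬ (N = 0 ∧ M = 0)
instance (N : Int) (M : Int) : Decidable (Pre_solution N M) := by unfold Pre_solution; infer_instance
def pvWitness_solution : Int × Int := (12, 8)
def Spec_solution (N : Int) (M : Int) (out : Int) : Prop := out = solution_alt N M
instance (N : Int) (M : Int) (out : Int) : Decidable (Spec_solution N M out) := by unfold Spec_solution; infer_instance

-- ===== CLAIM (what is proved, stated in full; the proofs are below) =====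
def Claim_equal_solution : Prop := ∀ (N : Int) (M : Int), Dom_solution N M → Pre_solution N M → Spec_solution N M (solution N M)

-- ===== LEMMAS AND PROOFS =====

-- ===== VERDICT (by name: the statement is the Claim_ definition above) =====
-- A's loop (for any value of the dead variable rest) computes exactly B's g
theorem solutionLoop_eq_G (A B : Int) : ∀ rest, solutionLoop rest A B = solutionG A B := by
  induction A, B using solutionG.induct with
  | case1 a => intro rest; rw [solutionLoop, solutionG]; simp
  | case2 a b h ih => intro rest; rw [solutionLoop, solutionG]; simp [h, ih]

theorem solutionG_one (N : Int) : solutionG N 1 = 1 := by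
  rw [solutionG]; simp [PySem.Int.mod]
  rw [solutionG]; simp

theorem solution_spec : Claim_equal_solution := by
  intro N M _ _
  unfold Spec_solution solution solution_alt
  rw [solutionLoop_eq_G]
  split_ifs with h
  · subst h
    rw [solutionG_one]
    simp [PySem.Int.floordiv]
  · rfl
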